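-- pv_equiv track=rewrite | github.com/heewinkim/utilpack | utilpack/core/time.py | _grouping_postprocessing
-- ===== SOURCE A (Python) =====
-- from collections import deque
--
-- def _grouping_postprocessing(groups,max):
--     """
--     너무 작게 나누어진 그룹 결과 다시 병합
--
--     :param groups: 나누어진 그룹들
--     :param max: 병합시 그룹길이의 최대길이
--     :return: 병합된 그룹, list
--     """
--
--     result = []
--
--     # 너무 작게 나누어진 그룹 결과 다시 병합
--     dq_groups = deque(groups)
--     while dq_groups:
--         curr_group = dq_groups.popleft()
--         result.append(curr_group)
--         if not dq_groups:
--             break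
--         next_group = dq_groups.popleft()
--         if len(curr_group) + len(next_group) <= max:
--             result[-1] = result[-1] + next_group
--         else:
--             result.append(next_group)
--
--     return result
-- ===== SOURCE B (Python) =====
-- def _grouping_postprocessing(groups, max):
--     """Merge each strictly positional pair (groups[2i], groups[2i+1]) when their
--     combined length fits within max; parity-split decomposition instead of a deque loop."""
--     evens = [g for i, g in enumerate(groups) if i % 2 == 0]
--     odds = [g for i, g in enumerate(groups) if i % 2 == 1]
--     result = []
--     for e, o in zip(evens, odds):
--         if len(e) + len(o) <= max:
--             result.append(e + o)
--         else:
--             result.append(e)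
--             result.append(o)
--     if len(groups) % 2 == 1:
--         result.append(groups[-1])
--     return result
-- ===== Notes on version B (the rewrite author's own statement) =====
-- stated objective: alternative
-- what changed: Replaced the deque pop-and-patch loop (which mutates result[-1] in place) with a parity split: filter groups into even- and odd-indexed lists, zip them, emit merged or separate groups per pair in one comprehension-style pass, and append the unpaired last group when the length is odd.
import Mathlib
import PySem

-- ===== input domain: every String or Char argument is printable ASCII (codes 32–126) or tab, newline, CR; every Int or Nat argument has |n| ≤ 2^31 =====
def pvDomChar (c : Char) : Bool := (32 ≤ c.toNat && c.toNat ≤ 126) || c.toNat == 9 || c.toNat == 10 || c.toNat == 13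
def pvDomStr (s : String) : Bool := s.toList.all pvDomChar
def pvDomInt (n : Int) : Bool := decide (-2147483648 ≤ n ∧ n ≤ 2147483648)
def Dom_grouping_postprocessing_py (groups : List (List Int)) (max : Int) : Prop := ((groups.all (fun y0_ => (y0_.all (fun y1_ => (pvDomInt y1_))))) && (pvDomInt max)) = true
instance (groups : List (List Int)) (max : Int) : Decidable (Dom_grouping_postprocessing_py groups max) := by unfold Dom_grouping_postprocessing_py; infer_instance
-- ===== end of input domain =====

-- B replaces A's deque pop-and-patch loop by a parity split (even-/odd-indexed sublists zipped pairwise); same cost, different decomposition; A mutates nothing observable, return values only.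

-- ===== PORT A =====
-- the while loop over the deque: `result` is the accumulator, the deque is the remaining list
def pvALoop (max : Int) : List (List Int) → List (List Int) → List (List Int)
  | result, [] => result
  | result, curr :: dq =>
    let result' := result ++ [curr]          -- result.append(curr_group)
    match dq with
    | [] => result'                          -- if not dq_groups: break
    | next :: dq' =>
      if ((curr.length : Int) + (next.length : Int)) ≤ max then
        -- result[-1] = result[-1] + next_group
        pvALoop max (result'.dropLast ++ [result'.getLastD [] ++ next]) dq'
      else
        pvALoop max (result' ++ [next]) dq'  -- result.append(next_group)
  termination_by _ l => l.length

def grouping_postprocessing_py (groups : List (List Int)) (max : Int) : List (List Int) :=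
  pvALoop max [] groups

-- ===== PORT B =====
def grouping_postprocessing_py_alt (groups : List (List Int)) (max : Int) : List (List Int) :=
  let evens := ((PySem.List.enumerate groups 0).filter (fun p => p.1 % 2 == 0)).map (·.2)
  let odds  := ((PySem.List.enumerate groups 0).filter (fun p => p.1 % 2 == 1)).map (·.2)
  let result := (evens.zip odds).foldl (fun r p =>
    if ((p.1.length : Int) + (p.2.length : Int)) ≤ max then r ++ [p.1 ++ p.2]
    else r ++ [p.1] ++ [p.2]) []
  -- len(groups) % 2 == 1 (len is nonnegative, so Lean's % is exact here);
  -- groups[-1]: when the length is odd the list is nonempty, so pyGet? is some and .getD [] is exact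
  if groups.length % 2 == 1 then result ++ [(PySem.List.pyGet? groups (-1)).getD []]
  else result

-- ===== PRECONDITION & SPEC =====
def Spec_grouping_postprocessing_py (groups : List (List Int)) (max : Int) (out : List (List Int)) : Prop := out = grouping_postprocessing_py_alt groups max
instance (groups : List (List Int)) (max : Int) (out : List (List Int)) : Decidable (Spec_grouping_postprocessing_py groups max out) := by unfold Spec_grouping_postprocessing_py; infer_instance

-- ===== CLAIM (what is proved, stated in full; the proofs are below) =====
def Claim_equal_grouping_postprocessing_py : Prop := ∀ (groups : List (List Int)) (max : Int), Dom_grouping_postprocessing_py groups max → Spec_grouping_postprocessing_py groups max (grouping_postprocessing_py groups max)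

-- ===== LEMMAS AND PROOFS =====

-- reference shape: consume two groups at a time
def pvSpine (max : Int) : List (List Int) → List (List Int)
  | [] => []
  | [c] => [c]
  | c :: n :: r =>
    if ((c.length : Int) + (n.length : Int)) ≤ max then (c ++ n) :: pvSpine max r
    else c :: n :: pvSpine max r

def pvEvens {α : Type} : List α → List α
  | [] => []
  | [a] => [a]
  | a :: _ :: r => a :: pvEvens r

def pvOdds {α : Type} : List α → List α
  | [] => []
  | [_] => []
  | _ :: b :: r => b :: pvOdds r

theorem pvALoop_eq_spine (max : Int) : ∀ (l acc : List (List Int)),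
    pvALoop max acc l = acc ++ pvSpine max l := by
  intro l
  induction l using pvSpine.induct max with
  | case1 => intro acc; simp [pvALoop, pvSpine]
  | case2 c => intro acc; simp [pvALoop, pvSpine]
  | case3 c n r h ih =>
    intro acc
    simp only [pvALoop, pvSpine, h, if_pos]
    rw [ih]
    simp
  | case4 c n r h ih =>
    intro acc
    simp only [pvALoop, pvSpine, h, if_neg, not_false_iff]
    rw [ih]
    simp

theorem sel_even {α : Type} : ∀ (xs : List α) (n : Int), n % 2 = 0 →
    ((PySem.List.enumerate xs n).filter (fun p => p.1 % 2 == 0)).map (·.2) = pvEvens xs := by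
  intro xs
  induction xs using pvEvens.induct with
  | case1 => intro n _; simp [PySem.List.enumerate_nil, pvEvens]
  | case2 a => intro n hn; simp [PySem.List.enumerate_cons, PySem.List.enumerate_nil, pvEvens, hn]
  | case3 a b r ih =>
    intro n hn
    have h1 : (n + 1) % 2 ≠ 0 := by omega
    have h2 : (n + 1 + 1) % 2 = 0 := by omega
    simp [PySem.List.enumerate_cons, pvEvens, hn, h1, ih _ h2]

theorem sel_odd {α : Type} : ∀ (xs : List α) (n : Int), n % 2 = 0 →
    ((PySem.List.enumerate xs n).filter (fun p => p.1 % 2 == 1)).map (·.2) = pvOdds xs := by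
  intro xs
  induction xs using pvOdds.induct with
  | case1 => intro n _; simp [PySem.List.enumerate_nil, pvOdds]
  | case2 a => intro n hn; simp [PySem.List.enumerate_cons, PySem.List.enumerate_nil, pvOdds, hn]
  | case3 a b r ih =>
    intro n hn
    have h1 : (n + 1) % 2 = 1 := by omega
    have h2 : (n + 1 + 1) % 2 = 0 := by omega
    simp [PySem.List.enumerate_cons, pvOdds, hn, h1, ih _ h2]

theorem pvFold_shift (max : Int) (z : List (List Int × List Int)) : ∀ (acc : List (List Int)),
    z.foldl (fun r p =>
      if ((p.1.length : Int) + (p.2.length : Int)) ≤ max then r ++ [p.1 ++ p.2]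
      else r ++ [p.1] ++ [p.2]) acc
    = acc ++ z.foldl (fun r p =>
      if ((p.1.length : Int) + (p.2.length : Int)) ≤ max then r ++ [p.1 ++ p.2]
      else r ++ [p.1] ++ [p.2]) [] := by
  induction z with
  | nil => simp
  | cons p z ih =>
    intro acc
    simp only [List.foldl_cons]
    rw [ih, ih (if ((p.1.length : Int) + (p.2.length : Int)) ≤ max
      then [] ++ [p.1 ++ p.2] else [] ++ [p.1] ++ [p.2])]
    split_ifs <;> simp

-- B on c :: n :: r: the pair (c, n) is emitted first, then B restarted on r
theorem pvAlt_cons_cons (max : Int) (c n : List Int) (r : List (List Int)) :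
    grouping_postprocessing_py_alt (c :: n :: r) max
    = (if ((c.length : Int) + (n.length : Int)) ≤ max
        then [c ++ n] else [c] ++ [n]) ++ grouping_postprocessing_py_alt r max := by
  unfold grouping_postprocessing_py_alt
  rw [sel_even (c :: n :: r) 0 (by omega), sel_odd (c :: n :: r) 0 (by omega),
      sel_even r 0 (by omega), sel_odd r 0 (by omega)]
  simp only [pvEvens, pvOdds, List.zip_cons_cons, List.foldl_cons]
  rw [pvFold_shift]
  have hlen : (c :: n :: r).length % 2 = r.length % 2 := by simp [List.length]; omega
  by_cases hr : r = []
  · subst hr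
    simp
  · have hlast : PySem.List.pyGet? (c :: n :: r) (-1) = PySem.List.pyGet? r (-1) := by
      rw [PySem.List.pyGet?_neg_one, PySem.List.pyGet?_neg_one]
      obtain ⟨x, r', rfl⟩ := List.exists_cons_of_ne_nil hr
      simp [List.getLast?_cons_cons]
    rw [hlen, hlast]
    split_ifs <;> simp

theorem pvAlt_eq_spine (max : Int) : ∀ (l : List (List Int)),
    grouping_postprocessing_py_alt l max = pvSpine max l := by
  intro l
  induction l using pvSpine.induct max with
  | case1 => simp [grouping_postprocessing_py_alt, pvSpine, PySem.List.enumerate_nil]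
  | case2 c =>
    simp [grouping_postprocessing_py_alt, pvSpine, PySem.List.enumerate_cons,
      PySem.List.enumerate_nil, PySem.List.pyGet?_neg_one]
  | case3 c n r h ih =>
    have hc := pvAlt_cons_cons max c n r
    rw [hc, ih]; simp [pvSpine, h]
  | case4 c n r h ih =>
    have hc := pvAlt_cons_cons max c n r
    rw [hc, ih]; simp [pvSpine, h]

-- ===== VERDICT (by name: the statement is the Claim_ definition above) =====
theorem grouping_postprocessing_py_spec : Claim_equal_grouping_postprocessing_py := by
  intro groups max _
  unfold Spec_grouping_postprocessing_py
  rw [pvAlt_eq_spine, grouping_postprocessing_py, pvALoop_eq_spine]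
  simp
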